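-- pv_equiv track=rewrite | github.com/monta0315/AtCoder_Python | 220/c.py | solve
-- ===== SOURCE A (Python) =====
-- def solve(n, a, x):
--     num = 0
--     SUM = 0
--     flag = True
--     while flag:
--         for i in a:
--             SUM += i
--             num += 1
--             if SUM > x:
--                 flag = False
--                 break
--
--     return num
-- ===== SOURCE B (Python) =====
-- def solve(n, a, x):
--     # prefix sums of one pass
--     pre = []
--     s = 0
--     for v in a:
--         s += v
--         pre.append(s)
--     S = s
--     M = max(pre)
--     # k = number of complete cycles before the stopping cycle
--     if M > x:
--         k = 0
--     else:
--         k = (x - M) // S + 1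
--     target = x - k * S
--     for i, p in enumerate(pre):
--         if p > target:
--             return k * len(a) + i + 1
-- ===== Notes on version B (the rewrite author's own statement) =====
-- stated objective: alternative
-- what changed: A walks the list cyclically adding one element at a time until the running sum exceeds x; B computes the number of complete cycles in closed form as (x - M)//S + 1 (S = total sum, M = max prefix sum) and then finds the stopping position in a single pass over the prefix sums.
import Mathlib
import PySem

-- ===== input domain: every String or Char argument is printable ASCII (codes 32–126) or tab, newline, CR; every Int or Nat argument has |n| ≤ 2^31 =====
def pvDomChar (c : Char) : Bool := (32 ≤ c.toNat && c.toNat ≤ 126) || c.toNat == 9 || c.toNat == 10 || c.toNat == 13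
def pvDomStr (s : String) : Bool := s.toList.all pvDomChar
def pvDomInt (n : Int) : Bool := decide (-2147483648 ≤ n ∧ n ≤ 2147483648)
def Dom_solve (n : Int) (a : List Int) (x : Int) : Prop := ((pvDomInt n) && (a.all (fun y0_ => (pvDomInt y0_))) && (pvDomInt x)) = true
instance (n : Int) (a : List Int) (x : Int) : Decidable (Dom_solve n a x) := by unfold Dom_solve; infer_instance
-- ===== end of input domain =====

-- B replaces A's step-by-step cyclic accumulation with a closed-form count of full
-- cycles (x−M)//S + 1 plus one pass over the prefix sums (a closed form instead of iteration).

-- ===== PORT A =====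
-- one 'for i in a' pass: state (SUM, num); third component = flag (false after break)
def passA (x : Int) : List Int → Int → Int → Int × Int × Bool
  | [], s, c => (s, c, true)
  | v :: r, s, c =>
      let s' := s + v
      let c' := c + 1
      if x < s' then (s', c', false) else passA x r s' c'

-- the 'while flag' loop; fuel is only a totality guard (Python's loop diverges
-- outside Pre_solve; inside Pre_solve this fuel is proved sufficient below)
def loopA (x : Int) (a : List Int) : Nat → Int → Int → Int
  | 0, _, c => c
  | fuel+1, s, c =>
      let t := passA x a s c
      if t.2.2 then loopA x a fuel t.1 t.2.1 else t.2.1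

def solve (n : Int) (a : List Int) (x : Int) : Int :=
  loopA x a (x.toNat + (a.map Int.natAbs).sum + 2) 0 0

-- ===== PORT B =====
-- Source B's first loop: returns (list of running prefix sums, final running sum)
def buildPre : List Int → Int → List Int × Int
  | [], s => ([], s)
  | v :: r, s =>
      let t := buildPre r (s + v)
      ((s + v) :: t.1, t.2)

-- Source B's final 'for i, p in enumerate(pre)' loop (0 = the unreachable fall-off-end case)
def bfind (target kd : Int) : List Int → Int → Int
  | [], _ => 0
  | p :: r, i => if target < p then kd + i + 1 else bfind target kd r (i + 1)

def solve_alt (n : Int) (a : List Int) (x : Int) : Int :=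
  let bp := buildPre a 0
  let S := bp.2
  let M := (PySem.List.max? bp.1 (fun y => y)).getD 0
  let k : Int := if x < M then 0 else PySem.Int.floordiv (x - M) S + 1
  let target := x - k * S
  bfind target (k * (a.length : Int)) bp.1 0

-- ===== PRECONDITION & SPEC =====
-- Pre_ excludes exactly the inputs on which A's while-loop never terminates (A returns
-- no value there): the empty list, and lists whose total is ≤ 0 with no prefix sum > x.
def Pre_solve (n : Int) (a : List Int) (x : Int) : Prop :=
  a ≠ [] ∧ (0 < a.sum ∨ ∃ i < a.length, x < (a.take (i + 1)).sum)
instance (n : Int) (a : List Int) (x : Int) : Decidable (Pre_solve n a x) := by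
  unfold Pre_solve; infer_instance
def pvWitness_solve : Int × List Int × Int := (3, [1, 2, 3], 10)

def Spec_solve (n : Int) (a : List Int) (x : Int) (out : Int) : Prop := out = solve_alt n a x
instance (n : Int) (a : List Int) (x : Int) (out : Int) : Decidable (Spec_solve n a x out) := by unfold Spec_solve; infer_instance

-- ===== CLAIM (what is proved, stated in full; the proofs are below) =====
def Claim_equal_solve : Prop := ∀ (n : Int) (a : List Int) (x : Int), Dom_solve n a x → Pre_solve n a x → Spec_solve n a x (solve n a x)

-- ===== LEMMAS AND PROOFS =====

theorem buildPre_snd (a : List Int) (s : Int) : (buildPre a s).2 = s + a.sum := by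
  induction a generalizing s with
  | nil => simp [buildPre]
  | cons v r ih => simp [buildPre, ih]; ring

theorem buildPre_length (a : List Int) (s : Int) : (buildPre a s).1.length = a.length := by
  induction a generalizing s with
  | nil => rfl
  | cons v r ih => simp [buildPre, ih]

theorem mem_buildPre (a : List Int) (s p : Int) :
    p ∈ (buildPre a s).1 ↔ ∃ i < a.length, p = s + (a.take (i + 1)).sum := by
  induction a generalizing s with
  | nil => simp [buildPre]
  | cons v r ih =>
    simp only [buildPre, List.mem_cons, ih]
    constructor
    · rintro (rfl | ⟨i, hi, rfl⟩)
      · exact ⟨0, by simp, by simp⟩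
      · exact ⟨i + 1, by simpa using hi, by simp [List.take_succ_cons]; ring⟩
    · rintro ⟨i, hi, rfl⟩
      cases i with
      | zero => left; simp
      | succ j =>
        right
        exact ⟨j, by simpa using hi, by simp [List.take_succ_cons]; ring⟩

theorem buildPre_shift (a : List Int) (d s : Int) :
    (buildPre a (d + s)).1 = ((buildPre a s).1).map (fun p => d + p) := by
  induction a generalizing s with
  | nil => simp [buildPre]
  | cons v r ih =>
    simp only [buildPre, List.map_cons]
    rw [add_assoc, ih (s + v)]

theorem buildPre_lb (a : List Int) (s p : Int) (hp : p ∈ (buildPre a s).1) :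
    s - ((a.map Int.natAbs).sum : Int) ≤ p := by
  induction a generalizing s with
  | nil => simp [buildPre] at hp
  | cons v r ih =>
    simp only [buildPre, List.mem_cons] at hp
    simp only [List.map_cons, List.sum_cons, Nat.cast_add]
    rcases hp with rfl | hp
    · omega
    · have := ih (s + v) hp
      omega

theorem bfind_shift (l : List Int) (target kd i : Int) :
    bfind target kd l (i + 1) = bfind target (kd + 1) l i := by
  induction l generalizing i with
  | nil => rfl
  | cons p r ih =>
    simp only [bfind]
    split
    · ring
    · rw [ih]

theorem bfind_map (l : List Int) (target kd i d : Int) :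
    bfind target kd (l.map (fun p => d + p)) i = bfind (target - d) kd l i := by
  induction l generalizing i with
  | nil => rfl
  | cons p r ih =>
    simp only [List.map_cons, bfind]
    have : (target < d + p) ↔ (target - d < p) := by omega
    rw [if_congr this rfl rfl, ih]

theorem passA_full (x : Int) (a : List Int) (s c : Int)
    (h : ∀ p ∈ (buildPre a s).1, p ≤ x) :
    passA x a s c = (s + a.sum, c + a.length, true) := by
  induction a generalizing s c with
  | nil => simp [passA]
  | cons v r ih =>
    have hh : s + v ≤ x := h (s + v) (by simp [buildPre])
    have ht : ∀ p ∈ (buildPre r (s + v)).1, p ≤ x := fun p hp => h p (by simp [buildPre, hp])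
    simp only [passA, if_neg (by omega : ¬ x < s + v)]
    rw [ih (s + v) (c + 1) ht]
    simp; constructor
    · ring
    · push_cast; ring

theorem passA_break (x : Int) (a : List Int) (s c : Int)
    (h : ∃ p ∈ (buildPre a s).1, x < p) :
    (passA x a s c).2 = (bfind x c (buildPre a s).1 0, false) := by
  induction a generalizing s c with
  | nil => simp [buildPre] at h
  | cons v r ih =>
    by_cases hv : x < s + v
    · simp [passA, buildPre, bfind, hv]
    · have ht : ∃ p ∈ (buildPre r (s + v)).1, x < p := by
        rcases h with ⟨p, hp, hxp⟩
        simp only [buildPre, List.mem_cons] at hp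
        rcases hp with rfl | hp
        · omega
        · exact ⟨p, hp, hxp⟩
      simp only [passA, buildPre, bfind, if_neg hv]
      rw [show (0 : Int) + 1 = 0 + 1 from rfl, bfind_shift]
      exact ih (s + v) (c + 1) ht

theorem loopA_main (x : Int) (a : List Int) (S M k : Int)
    (hS : S = a.sum)
    (hMmem : M ∈ (buildPre a 0).1)
    (hMmax : ∀ p ∈ (buildPre a 0).1, p ≤ M)
    (hkbreak : x < k * S + M)
    (hkmin : ∀ j : Int, 0 ≤ j → j < k → j * S + M ≤ x) :
    ∀ (m : Nat) (j : Int), 0 ≤ j → j ≤ k → k - j < (m : Int) →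
      loopA x a m (j * S) (j * (a.length : Int)) =
        bfind (x - k * S) (k * (a.length : Int)) (buildPre a 0).1 0 := by
  intro m
  induction m with
  | zero => intro j h0 hjk hm; exfalso; omega
  | succ m ih =>
    intro j h0 hjk hm
    have hshift : (buildPre a (j * S)).1 = ((buildPre a 0).1).map (fun p => j * S + p) := by
      have := buildPre_shift a (j * S) 0
      simpa using this
    by_cases hj : j = k
    · subst hj
      have hex : ∃ p ∈ (buildPre a (j * S)).1, x < p := by
        refine ⟨j * S + M, ?_, by omega⟩
        rw [hshift]; exact List.mem_map_of_mem hMmem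
      have hb := passA_break x a (j * S) (j * (a.length : Int)) hex
      simp only [loopA]
      have hflag : (passA x a (j * S) (j * (a.length : Int))).2.2 = false := by
        rw [hb]
      have hnum : (passA x a (j * S) (j * (a.length : Int))).2.1 =
          bfind x (j * (a.length : Int)) (buildPre a (j * S)).1 0 := by
        rw [hb]
      rw [if_neg (by simp [hflag])]
      rw [hnum, hshift, bfind_map]
    · have hjk' : j < k := lt_of_le_of_ne hjk hj
      have hall : ∀ p ∈ (buildPre a (j * S)).1, p ≤ x := by
        intro p hp
        rw [hshift] at hp
        rcases List.mem_map.mp hp with ⟨p0, hp0, rfl⟩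
        have := hMmax p0 hp0
        have := hkmin j h0 hjk'
        omega
      have hf := passA_full x a (j * S) (j * (a.length : Int)) hall
      simp only [loopA, hf]
      have h1 : j * S + a.sum = (j + 1) * S := by rw [hS]; ring
      have h2 : j * (a.length : Int) + (a.length : Int) = (j + 1) * (a.length : Int) := by ring
      rw [h1, h2]
      exact ih (j + 1) (by omega) (by omega) (by omega)

-- ===== VERDICT (by name: the statement is the Claim_ definition above) =====
theorem solve_spec : Claim_equal_solve := by
  intro n a x hdom hpre
  obtain ⟨hne, hhalt⟩ := hpre
  show solve n a x = solve_alt n a x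
  -- the prefix-sum list is nonempty
  have hlen : (buildPre a 0).1.length = a.length := buildPre_length a 0
  have hprene : (buildPre a 0).1 ≠ [] := by
    intro h
    apply hne
    have : a.length = 0 := by rw [← hlen, h]; rfl
    exact List.eq_nil_of_length_eq_zero this
  -- M = the maximum of the prefix sums, as the port computes it
  obtain ⟨m, hm⟩ : ∃ m, PySem.List.max? (buildPre a 0).1 (fun y => y) = some m := by
    cases h : PySem.List.max? (buildPre a 0).1 (fun y => y) with
    | none => exact absurd ((PySem.List.max?_eq_none_iff _ _).mp h) hprene
    | some m => exact ⟨m, rfl⟩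
  have hMval : (PySem.List.max? (buildPre a 0).1 (fun y => y)).getD 0 = m := by rw [hm]; rfl
  have hMmem : m ∈ (buildPre a 0).1 := PySem.List.max?_mem hm
  have hMmax : ∀ p ∈ (buildPre a 0).1, p ≤ m := fun p hp => PySem.List.max?_isMax hm p hp
  set S := a.sum with hSdef
  -- the port's cycle count k and its minimality bracket
  set k : Int := if x < m then 0 else PySem.Int.floordiv (x - m) S + 1 with hkdef
  have hhaltM : 0 < S ∨ x < m := by
    rcases hhalt with h | ⟨i, hi, hxi⟩
    · exact Or.inl h
    · right
      have : (0 : Int) + (a.take (i + 1)).sum ∈ (buildPre a 0).1 :=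
        (mem_buildPre a 0 _).mpr ⟨i, hi, rfl⟩
      have := hMmax _ this
      omega
  have hk : 0 ≤ k ∧ x < k * S + m ∧ (∀ j : Int, 0 ≤ j → j < k → j * S + m ≤ x) := by
    by_cases hxm : x < m
    · refine ⟨by simp [hkdef, hxm], by simp [hkdef, hxm], ?_⟩
      intro j h0 hj; simp [hkdef, hxm] at hj; omega
    · have hSpos : 0 < S := by rcases hhaltM with h | h; exact h; exact absurd h hxm
      set q : Int := PySem.Int.floordiv (x - m) S with hqdef
      have hbr : q * S ≤ x - m ∧ x - m < (q + 1) * S :=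
        (PySem.Int.floordiv_eq_iff_of_pos hSpos).mp hqdef.symm
      have hkq : k = q + 1 := by simp [hkdef, hxm, hqdef]
      have hq0 : 0 ≤ q := by
        by_contra hneg
        have hle : q + 1 ≤ 0 := by omega
        have : (q + 1) * S ≤ 0 := mul_nonpos_of_nonpos_of_nonneg hle (le_of_lt hSpos)
        omega
      refine ⟨by omega, by rw [hkq]; omega, ?_⟩
      intro j h0 hj
      rw [hkq] at hj
      have h4 : j * S ≤ q * S := mul_le_mul_of_nonneg_right (by omega) (le_of_lt hSpos)
      have h5 : (q + 1) * S = q * S + S := by ring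
      omega
    -- fuel is sufficient: k < x.toNat + Σ|aᵢ| + 2
  have hMlb : (0 : Int) - ((a.map Int.natAbs).sum : Int) ≤ m := buildPre_lb a 0 m hMmem
  have hfuel : k < ((x.toNat + (a.map Int.natAbs).sum + 2 : Nat) : Int) := by
    have hxle : x ≤ (x.toNat : Int) := Int.self_le_toNat x
    by_cases hxm : x < m
    · have : k = 0 := by simp [hkdef, hxm]
      simp only [Nat.cast_add, Nat.cast_ofNat]
      omega
    · have hSpos : 0 < S := by rcases hhaltM with h | h; exact h; exact absurd h hxm
      set q : Int := PySem.Int.floordiv (x - m) S with hqdef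
      have hbr : q * S ≤ x - m ∧ x - m < (q + 1) * S :=
        (PySem.Int.floordiv_eq_iff_of_pos hSpos).mp hqdef.symm
      have hq0 : 0 ≤ q := by
        by_contra hneg
        have hle : q + 1 ≤ 0 := by omega
        have : (q + 1) * S ≤ 0 := mul_nonpos_of_nonpos_of_nonneg hle (le_of_lt hSpos)
        omega
      have hqq : q ≤ q * S := by
        have := mul_le_mul_of_nonneg_left (by omega : (1 : Int) ≤ S) hq0
        simpa using this
      have hkq : k = q + 1 := by simp [hkdef, hxm, hqdef]
      simp only [Nat.cast_add, Nat.cast_ofNat]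
      omega
  -- run the loop
  have hmain := loopA_main x a S m k rfl hMmem hMmax hk.2.1 hk.2.2
    (x.toNat + (a.map Int.natAbs).sum + 2) 0 (le_refl 0) hk.1 (by simpa using hfuel)
  simp only [zero_mul] at hmain
  -- both sides
  show loopA x a (x.toNat + (a.map Int.natAbs).sum + 2) 0 0 = _
  rw [hmain]
  simp only [solve_alt]
  rw [hMval, buildPre_snd a 0, zero_add, ← hSdef, ← hkdef]
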